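-- pv_equiv track=rewrite | github.com/renovate-bot/khulnasoft-lab-_-ai-assist | codesuggestions/suggestions/processing/ops.py | find_alnum_point
-- ===== SOURCE A (Python) =====
-- def find_alnum_point(value: str, start_index: int = 0) -> tuple[int, int]:
--     row = 0
--     col = 0
--
--     found_row = -1
--     found_col = -1
--
--     for idx, c in enumerate(value):
--         if c == "\n":
--             # increase the row counter and reset the column one
--             row += 1
--             col = 0
--             continue
--
--         if idx >= start_index and c.isalnum():
--             found_row = row
--             found_col = col
--             break
--
--         col += 1
--
--     return found_row, found_col
-- ===== SOURCE B (Python) =====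
-- def find_alnum_point(value: str, start_index: int = 0) -> tuple[int, int]:
--     # locate the target global index first, then recount rows/columns up to it
--     i0 = max(0, start_index)
--     off = -1
--     for k, c in enumerate(value[i0:]):
--         if c.isalnum():
--             off = k
--             break
--     if off == -1:
--         return (-1, -1)
--     i = i0 + off
--     row = 0
--     last_nl = -1
--     for j, c in enumerate(value[:i]):
--         if c == "\n":
--             row += 1
--             last_nl = j
--     return (row, i - last_nl - 1)
-- ===== Notes on version B (the rewrite author's own statement) =====
-- stated objective: alternative
-- what changed: A is one fused loop that maintains row/col counters with newline resets and an early break; B first locates the global index of the first alphanumeric char at/after max(0,start_index), then derives row and column from that index by a separate pass counting newlines and the last newline position before it.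
import Mathlib
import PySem

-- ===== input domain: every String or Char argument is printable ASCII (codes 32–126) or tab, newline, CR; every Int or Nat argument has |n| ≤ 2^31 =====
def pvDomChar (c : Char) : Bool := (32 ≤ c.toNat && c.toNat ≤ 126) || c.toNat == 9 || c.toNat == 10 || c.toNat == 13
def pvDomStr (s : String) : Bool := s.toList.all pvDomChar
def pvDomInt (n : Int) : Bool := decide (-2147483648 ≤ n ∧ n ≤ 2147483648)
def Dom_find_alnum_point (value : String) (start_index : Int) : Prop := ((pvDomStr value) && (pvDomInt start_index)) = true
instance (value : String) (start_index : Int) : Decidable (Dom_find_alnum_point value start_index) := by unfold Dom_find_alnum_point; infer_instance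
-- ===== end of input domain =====

-- B locates the first alphanumeric index at/after max(0,start_index) and then derives
-- row/col from it in a second counting pass, instead of A's single fused counter loop.


-- ===== PORT A =====
-- A's fused loop: row/col counters, newline resets, break on the first match.
def pvGoA (si : Int) : List Char → Nat → Int → Int → Int × Int
  | [], _, _, _ => (-1, -1)
  | c :: rest, idx, row, col =>
    if c = '\n' then pvGoA si rest (idx + 1) (row + 1) 0
    else if (idx : Int) ≥ si ∧ PySem.Chars.isalnum c = true then (row, col)
    else pvGoA si rest (idx + 1) row (col + 1)

def find_alnum_point (value : String) (start_index : Int) : Int × Int :=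
  pvGoA start_index value.toList 0 0 0

-- ===== PORT B =====
-- B's locate loop over value[i0:] ('off = k; break' on the first alnum char, else off = -1).
def pvFindOff : List Char → Int → Int
  | [], _ => -1
  | c :: rest, k => if PySem.Chars.isalnum c = true then k else pvFindOff rest (k + 1)

-- B's second pass over value[:i]: count newlines and remember the last newline index.
def pvCountNL : List Char → Int → Int → Int → Int × Int
  | [], _, row, last => (row, last)
  | c :: rest, j, row, last =>
    if c = '\n' then pvCountNL rest (j + 1) (row + 1) j
    else pvCountNL rest (j + 1) row last

def find_alnum_point_alt (value : String) (start_index : Int) : Int × Int :=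
  let cs := value.toList
  let i0 : Int := max 0 start_index
  let off := pvFindOff (PySem.List.slice cs (some i0) none) 0
  if off = -1 then (-1, -1)
  else
    let i : Int := i0 + off
    let rc := pvCountNL (PySem.List.slice cs none (some i)) 0 0 (-1)
    (rc.1, i - rc.2 - 1)

-- ===== PRECONDITION & SPEC =====
def Spec_find_alnum_point (value : String) (start_index : Int) (out : Int × Int) : Prop := out = find_alnum_point_alt value start_index
instance (value : String) (start_index : Int) (out : Int × Int) : Decidable (Spec_find_alnum_point value start_index out) := by unfold Spec_find_alnum_point; infer_instance

-- ===== CLAIM (what is proved, stated in full; the proofs are below) =====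
def Claim_equal_find_alnum_point : Prop := ∀ (value : String) (start_index : Int), Dom_find_alnum_point value start_index → Spec_find_alnum_point value start_index (find_alnum_point value start_index)

-- ===== LEMMAS AND PROOFS =====

-- first index k (relative) with idx+k ≥ si and alnum, as A's loop tests it
def pvFirstK (si : Int) : List Char → Nat → Option Nat
  | [], _ => none
  | c :: rest, idx =>
    if (idx : Int) ≥ si ∧ PySem.Chars.isalnum c = true then some 0
    else (pvFirstK si rest (idx + 1)).map (· + 1)

-- first alnum offset, unconditionally
def pvOFind : List Char → Option Nat
  | [] => none
  | c :: rest => if PySem.Chars.isalnum c = true then some 0 else (pvOFind rest).map (· + 1)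

-- length of the run of non-newline chars at the END of l (the column at position l.length)
def pvColAfter : List Char → Nat
  | [] => 0
  | c :: rest => if '\n' ∈ rest then pvColAfter rest
                 else if c = '\n' then rest.length else rest.length + 1

theorem pvFirstK_lt (si : Int) : ∀ (cs : List Char) (idx k : Nat),
    pvFirstK si cs idx = some k → k < cs.length := by
  intro cs
  induction cs with
  | nil => intro idx k h; simp [pvFirstK] at h
  | cons c rest ih =>
    intro idx k h
    simp only [pvFirstK] at h
    split at h
    · simp at h; simp only [List.length_cons]; omega
    · cases hh : pvFirstK si rest (idx + 1) with
      | none => rw [hh] at h; simp at h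
      | some m =>
        rw [hh] at h; simp at h
        have := ih (idx + 1) m hh
        simp only [List.length_cons]; omega

theorem pvGoA_spec (si : Int) : ∀ (cs : List Char) (idx : Nat) (row col : Int),
    pvGoA si cs idx row col =
      match pvFirstK si cs idx with
      | none => (-1, -1)
      | some k => (row + ((cs.take k).count '\n' : Int),
          if '\n' ∈ cs.take k then ((pvColAfter (cs.take k) : Nat) : Int) else col + k) := by
  intro cs
  induction cs with
  | nil => intro idx row col; simp [pvGoA, pvFirstK]
  | cons c rest ih =>
    intro idx row col
    by_cases hnl : c = '\n'
    · subst hnl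
      have hcond : ¬ ((idx : Int) ≥ si ∧ PySem.Chars.isalnum '\n' = true) := by
        rintro ⟨-, h⟩; exact absurd h (by decide)
      simp only [pvGoA, pvFirstK, if_neg hcond]
      rw [ih (idx + 1) (row + 1) 0]
      cases hh : pvFirstK si rest (idx + 1) with
      | none => simp
      | some k =>
        have hk := pvFirstK_lt si rest (idx + 1) k hh
        simp only [Option.map_some]
        simp only [List.take_succ_cons]
        by_cases hm : '\n' ∈ rest.take k
        · simp [pvColAfter, hm]
          ring
        · simp [pvColAfter, hm, List.length_take, Nat.min_eq_left (le_of_lt hk)]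
          ring
    · by_cases hcond : (idx : Int) ≥ si ∧ PySem.Chars.isalnum c = true
      · simp only [pvGoA, pvFirstK, if_neg hnl, if_pos hcond]
        simp
      · simp only [pvGoA, pvFirstK, if_neg hnl, if_neg hcond]
        rw [ih (idx + 1) row (col + 1)]
        cases hh : pvFirstK si rest (idx + 1) with
        | none => simp
        | some k =>
          simp only [Option.map_some]
          simp only [List.take_succ_cons]
          by_cases hm : '\n' ∈ rest.take k
          · have hm' : '\n' ∈ c :: rest.take k := List.mem_cons_of_mem _ hm
            simp [pvColAfter, hm, hm', hnl]
          · have hm' : ¬ '\n' ∈ c :: rest.take k := by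
              simp [List.mem_cons, hm, Ne.symm hnl]
            simp [hm, hm', hnl]
            ring

theorem pvFirstK_drop (si : Int) : ∀ (cs : List Char) (idx : Nat),
    pvFirstK si cs idx = (pvOFind (cs.drop (si.toNat - idx))).map (· + (si.toNat - idx)) := by
  intro cs
  induction cs with
  | nil => intro idx; simp [pvFirstK, pvOFind]
  | cons c rest ih =>
    intro idx
    by_cases hge : (idx : Int) ≥ si
    · have hd : si.toNat - idx = 0 := by omega
      rw [hd]
      simp only [List.drop_zero]
      by_cases ha : PySem.Chars.isalnum c = true
      · simp [pvFirstK, pvOFind, hge, ha]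
      · simp only [pvFirstK, pvOFind, if_neg (by tauto : ¬((idx : Int) ≥ si ∧ PySem.Chars.isalnum c = true)), if_neg ha]
        rw [ih (idx + 1)]
        have hd1 : si.toNat - (idx + 1) = 0 := by omega
        rw [hd1]
        simp only [List.drop_zero]
        cases hh : pvOFind rest with
        | none => simp
        | some m => simp
    · have hd : 1 ≤ si.toNat - idx := by omega
      have hcond : ¬ ((idx : Int) ≥ si ∧ PySem.Chars.isalnum c = true) := by tauto
      simp only [pvFirstK, if_neg hcond]
      rw [ih (idx + 1)]
      have hdrop : (c :: rest).drop (si.toNat - idx) = rest.drop (si.toNat - (idx + 1)) := by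
        have : si.toNat - idx = (si.toNat - (idx + 1)) + 1 := by omega
        rw [this]; rfl
      rw [hdrop]
      cases pvOFind (rest.drop (si.toNat - (idx + 1))) with
      | none => simp
      | some m => simp; omega

theorem pvFindOff_eq : ∀ (l : List Char) (k : Int),
    pvFindOff l k = match pvOFind l with
      | none => -1
      | some m => k + (m : Int) := by
  intro l
  induction l with
  | nil => intro k; simp [pvFindOff, pvOFind]
  | cons c rest ih =>
    intro k
    by_cases ha : PySem.Chars.isalnum c = true
    · simp [pvFindOff, pvOFind, ha]
    · simp only [pvFindOff, pvOFind, if_neg ha]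
      rw [ih (k + 1)]
      cases hh : pvOFind rest with
      | none => simp
      | some m => simp; ring

theorem pvOFind_lt : ∀ (l : List Char) (m : Nat), pvOFind l = some m → m < l.length := by
  intro l
  induction l with
  | nil => intro m h; simp [pvOFind] at h
  | cons c rest ih =>
    intro m h
    simp only [pvOFind] at h
    split at h
    · simp at h; simp only [List.length_cons]; omega
    · cases hh : pvOFind rest with
      | none => rw [hh] at h; simp at h
      | some p =>
        rw [hh] at h; simp at h
        have := ih p hh
        simp; omega

theorem pvCountNL_spec : ∀ (l : List Char) (j row last : Int),
    pvCountNL l j row last =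
      (row + (l.count '\n' : Int),
       if '\n' ∈ l then j + (l.length : Int) - 1 - (pvColAfter l : Int) else last) := by
  intro l
  induction l with
  | nil => intro j row last; simp [pvCountNL]
  | cons c rest ih =>
    intro j row last
    by_cases hnl : c = '\n'
    · subst hnl
      simp only [pvCountNL, if_pos]
      rw [ih (j + 1) (row + 1) j]
      by_cases hm : '\n' ∈ rest
      · simp [pvColAfter, hm]
        constructor
        · ring
        · ring
      · simp [pvColAfter, hm]
        constructor
        · ring
        · ring
    · simp only [pvCountNL, if_neg hnl]
      rw [ih (j + 1) row last]
      by_cases hm : '\n' ∈ rest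
      · have hm' : '\n' ∈ c :: rest := List.mem_cons_of_mem _ hm
        simp [pvColAfter, hm, hm', hnl]
        ring
      · have hm' : ¬ '\n' ∈ c :: rest := by simp [hm, Ne.symm hnl]
        simp [hm, hm', hnl]

-- ===== VERDICT (by name: the statement is the Claim_ definition above) =====
theorem find_alnum_point_spec : Claim_equal_find_alnum_point := by
  intro value start_index _
  unfold Spec_find_alnum_point find_alnum_point
  simp only [find_alnum_point_alt]
  set si := start_index with hsi
  set cs := value.toList with hcs
  have h0 : (0 : Int) ≤ max 0 si := le_max_left 0 si
  have htoNat : (max 0 si).toNat = si.toNat := by omega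
  rw [PySem.List.slice_from cs h0, htoNat]
  rw [pvGoA_spec si cs 0 0 0, pvFirstK_drop si cs 0]
  simp only [Nat.sub_zero]
  cases hof : pvOFind (cs.drop si.toNat) with
  | none =>
    rw [pvFindOff_eq]
    simp [hof]
  | some m =>
    have hmlt := pvOFind_lt _ m hof
    have hlen : si.toNat + m < cs.length := by
      rw [List.length_drop] at hmlt; omega
    rw [pvFindOff_eq]
    simp only [hof, Option.map_some]
    have hoff : (max 0 si) + ((0 : Int) + (m : Int)) = ((m + si.toNat : Nat) : Int) := by
      push_cast; omega
    have hne : ¬ ((0 : Int) + (m : Int) = -1) := by omega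
    rw [if_neg hne]
    have hi : (0 : Int) ≤ max 0 si + (0 + (m : Int)) := by omega
    rw [PySem.List.slice_to cs hi]
    have hitoNat : (max 0 si + (0 + (m : Int))).toNat = m + si.toNat := by omega
    rw [hitoNat]
    rw [pvCountNL_spec]
    have hlentake : (cs.take (m + si.toNat)).length = m + si.toNat :=
      List.length_take_of_le (by omega)
    by_cases hm : '\n' ∈ cs.take (m + si.toNat)
    · simp only [hm, if_pos, Prod.mk.injEq, hlentake]
      refine ⟨trivial, ?_⟩
      rw [hoff]
      push_cast
      omega
    · simp only [hm, if_false, Prod.mk.injEq]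
      refine ⟨trivial, ?_⟩
      rw [hoff]
      push_cast
      omega
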